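-- pv_equiv track=rewrite | github.com/AdamZhouSE/pythonHomework | Code/CodeRecords/2887/60643/284863.py | isAlive
-- ===== SOURCE A (Python) =====
-- def isAlive(lst):
--     res1="DEAD"
--     res2="DEAD"
--     suc_1=sum(item[1] for item in lst if item[0]==1)
--     fai_1=sum(item[2] for item in lst if item[0]==1)
--     if suc_1>=fai_1:
--         res1="LIVE"
--     suc_2 = sum(item[1] for item in lst if item[0] == 2)
--     fai_2 = sum(item[2] for item in lst if item[0] == 2)
--     if suc_2 >= fai_2:
--         res2 = "LIVE"
--     return res1,res2
-- ===== SOURCE B (Python) =====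
-- def isAlive(lst):
--     # One dict pass keeping the signed net score (successes minus failures)
--     # per group; a group is LIVE iff its net score is non-negative.
--     net = {1: 0, 2: 0}
--     for g, s, f in lst:
--         if g in net:
--             net[g] += s - f
--     return tuple("LIVE" if net[k] >= 0 else "DEAD" for k in (1, 2))
-- ===== Notes on version B (the rewrite author's own statement) =====
-- stated objective: alternative
-- what changed: A makes four filtered-sum passes and compares successes against failures per group; B builds one dict mapping each group to its signed net score (successes minus failures) in a single pass and reads LIVE/DEAD off the sign of the two net scores.
import Mathlib
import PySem

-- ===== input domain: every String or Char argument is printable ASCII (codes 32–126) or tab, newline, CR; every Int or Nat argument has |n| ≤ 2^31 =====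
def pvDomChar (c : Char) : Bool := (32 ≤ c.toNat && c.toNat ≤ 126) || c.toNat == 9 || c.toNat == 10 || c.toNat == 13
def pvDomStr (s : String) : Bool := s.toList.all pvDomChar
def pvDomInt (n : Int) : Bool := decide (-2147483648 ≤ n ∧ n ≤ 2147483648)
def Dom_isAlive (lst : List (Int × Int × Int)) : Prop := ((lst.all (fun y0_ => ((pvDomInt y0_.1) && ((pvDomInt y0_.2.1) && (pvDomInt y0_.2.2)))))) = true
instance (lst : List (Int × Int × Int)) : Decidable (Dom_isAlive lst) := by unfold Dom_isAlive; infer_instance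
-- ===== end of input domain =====

-- B keeps one dict of signed per-group net scores (suc - fai) instead of A's four filtered-sum passes (objective: alternative).


-- ===== PORT A =====
-- four generator sums, each a fold over the whole list, then two conditional updates
def isAlive (lst : List (Int × Int × Int)) : String × String :=
  let res1 := "DEAD"
  let res2 := "DEAD"
  let suc1 := lst.foldl (fun acc it => if it.1 = 1 then acc + it.2.1 else acc) (0 : Int)
  let fai1 := lst.foldl (fun acc it => if it.1 = 1 then acc + it.2.2 else acc) (0 : Int)
  let res1 := if suc1 ≥ fai1 then "LIVE" else res1
  let suc2 := lst.foldl (fun acc it => if it.1 = 2 then acc + it.2.1 else acc) (0 : Int)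
  let fai2 := lst.foldl (fun acc it => if it.1 = 2 then acc + it.2.2 else acc) (0 : Int)
  let res2 := if suc2 ≥ fai2 then "LIVE" else res2
  (res1, res2)

-- ===== PORT B =====
-- dict {1: 0, 2: 0} of net scores, one pass doing net[g] += s - f for the known groups,
-- then LIVE iff the net score is non-negative (net[k] read via getD 0: keys 1 and 2 are always present)
def isAlive_alt (lst : List (Int × Int × Int)) : String × String :=
  let net := lst.foldl
    (fun (d : PySem.Dict Int Int) it =>
      if d.contains it.1 then d.insert it.1 (d.getD it.1 0 + (it.2.1 - it.2.2)) else d)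
    (PySem.Dict.ofList [(1, 0), (2, 0)])
  ((if net.getD 1 0 ≥ 0 then "LIVE" else "DEAD"),
   (if net.getD 2 0 ≥ 0 then "LIVE" else "DEAD"))

-- ===== PRECONDITION & SPEC =====
def Spec_isAlive (lst : List (Int × Int × Int)) (out : String × String) : Prop := out = isAlive_alt lst
instance (lst : List (Int × Int × Int)) (out : String × String) : Decidable (Spec_isAlive lst out) := by unfold Spec_isAlive; infer_instance

-- ===== CLAIM (what is proved, stated in full; the proofs are below) =====
def Claim_equal_isAlive : Prop := ∀ (lst : List (Int × Int × Int)), Dom_isAlive lst → Spec_isAlive lst (isAlive lst)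

-- ===== LEMMAS AND PROOFS =====
-- shifting the initial accumulator out of a filtered-sum fold
theorem fold_shift (g : Int) (f : Int × Int × Int → Int) (xs : List (Int × Int × Int)) (c : Int) :
    xs.foldl (fun acc it => if it.1 = g then acc + f it else acc) c
    = c + xs.foldl (fun acc it => if it.1 = g then acc + f it else acc) 0 := by
  induction xs generalizing c with
  | nil => simp
  | cons y ys ih =>
    simp only [List.foldl_cons]
    by_cases h : y.1 = g
    · rw [if_pos h, if_pos h, ih (c + f y), ih (0 + f y)]; ring
    · rw [if_neg h, if_neg h, ih c]

-- B's dict fold keeps exactly the two initial keys; each value is its initial value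
-- plus the per-group difference of A's two filtered folds.
theorem isAlive_dict_fold (lst : List (Int × Int × Int)) (a b : Int) :
    lst.foldl
      (fun (d : PySem.Dict Int Int) it =>
        if d.contains it.1 then d.insert it.1 (d.getD it.1 0 + (it.2.1 - it.2.2)) else d)
      (PySem.Dict.ofList [(1, a), (2, b)])
    = PySem.Dict.ofList
        [(1, a + lst.foldl (fun acc it => if it.1 = 1 then acc + it.2.1 else acc) 0
             - lst.foldl (fun acc it => if it.1 = 1 then acc + it.2.2 else acc) 0),
         (2, b + lst.foldl (fun acc it => if it.1 = 2 then acc + it.2.1 else acc) 0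
             - lst.foldl (fun acc it => if it.1 = 2 then acc + it.2.2 else acc) 0)] := by
  induction lst generalizing a b with
  | nil => simp
  | cons x xs ih =>
    obtain ⟨g, s, f⟩ := x
    simp only [List.foldl_cons]
    by_cases h1 : g = 1
    · subst h1
      have hd : (if (PySem.Dict.ofList [((1:Int), a), (2, b)]).contains 1 then
          (PySem.Dict.ofList [((1:Int), a), (2, b)]).insert 1
            ((PySem.Dict.ofList [((1:Int), a), (2, b)]).getD 1 0 + (s - f)) else
          PySem.Dict.ofList [((1:Int), a), (2, b)])
          = PySem.Dict.ofList [((1:Int), a + (s - f)), (2, b)] := rfl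
      rw [hd, ih]
      norm_num
      rw [fold_shift 1 (fun it => it.2.1) xs s, fold_shift 1 (fun it => it.2.2) xs f]
      apply congrArg
      simp only [List.cons.injEq, Prod.mk.injEq]
      and_intros <;> first | ring | rfl | trivial
    · by_cases h2 : g = 2
      · subst h2
        have hd : (if (PySem.Dict.ofList [((1:Int), a), (2, b)]).contains 2 then
            (PySem.Dict.ofList [((1:Int), a), (2, b)]).insert 2
              ((PySem.Dict.ofList [((1:Int), a), (2, b)]).getD 2 0 + (s - f)) else
            PySem.Dict.ofList [((1:Int), a), (2, b)])
            = PySem.Dict.ofList [((1:Int), a), (2, b + (s - f))] := rfl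
        rw [hd, ih]
        norm_num
        rw [fold_shift 2 (fun it => it.2.1) xs s, fold_shift 2 (fun it => it.2.2) xs f]
        apply congrArg
        simp only [List.cons.injEq, Prod.mk.injEq]
        and_intros <;> first | ring | rfl | trivial
      · have hc : (PySem.Dict.ofList [((1:Int), a), (2, b)]).contains g = false := by
          rw [show PySem.Dict.ofList [((1:Int),a),(2,b)] = PySem.Dict.mk [((1:Int),a),(2,b)] from rfl]
          simp [PySem.Dict.contains_mk]
          omega
        rw [if_neg (by simp [hc]), ih]
        rw [if_neg (by simp [h1]), if_neg (by simp [h1]), if_neg (by simp [h2]), if_neg (by simp [h2])]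

-- ===== VERDICT (by name: the statement is the Claim_ definition above) =====
theorem isAlive_spec : Claim_equal_isAlive := by
  intro lst _
  unfold Spec_isAlive isAlive isAlive_alt
  rw [isAlive_dict_fold]
  dsimp only
  rw [show ∀ X Y : Int, (PySem.Dict.ofList [((1:Int),X),(2,Y)]).getD 1 0 = X from fun X Y => rfl,
      show ∀ X Y : Int, (PySem.Dict.ofList [((1:Int),X),(2,Y)]).getD 2 0 = Y from fun X Y => rfl]
  refine Prod.ext ?_ ?_ <;> simp only [] <;> split_ifs <;> first | rfl | omega
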